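-- pv_equiv track=rewrite | github.com/dtrich2/3dice-sweep | power_class_def.py | invert_range
-- ===== SOURCE A (Python) =====
-- def invert_range(range_on_level, boundarysize):
--     newrange=[]
--     if range_on_level==[] or range_on_level==[[]]:
--         newrange=[[boundarysize, 1-boundarysize]]
--         return newrange
--     if range_on_level[0][0]>boundarysize:
--         newrange.append([boundarysize,range_on_level[0][0]])
--     if range_on_level[-1][1]<1-boundarysize:   #last element doesn't hit the boundary
--         newrange.append([range_on_level[-1][1],1-boundarysize])
--     range_on_level_ind=1
--     while range_on_level_ind<len(range_on_level):
--         newrange.append([range_on_level[range_on_level_ind-1][1],range_on_level[range_on_level_ind][0]])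
--         range_on_level_ind+=1
--     newrange.sort()
--     return newrange
-- ===== SOURCE B (Python) =====
-- def _insert_sorted(g, out):
--     # insert g before the first element it is smaller than (stable, keeps out sorted)
--     for i, y in enumerate(out):
--         if g < y:
--             return out[:i] + [g] + out[i:]
--     return out + [g]
--
--
-- def invert_range(range_on_level, boundarysize):
--     if range_on_level == [] or range_on_level == [[]]:
--         return [[boundarysize, 1 - boundarysize]]
--     gaps = [[prev[1], cur[0]] for prev, cur in zip(range_on_level, range_on_level[1:])]
--     if range_on_level[0][0] > boundarysize:
--         gaps = gaps + [[boundarysize, range_on_level[0][0]]]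
--     if range_on_level[-1][1] < 1 - boundarysize:
--         gaps = gaps + [[range_on_level[-1][1], 1 - boundarysize]]
--     out = []
--     for g in gaps:
--         out = _insert_sorted(g, out)
--     return out
-- ===== Notes on version B (the rewrite author's own statement) =====
-- stated objective: alternative
-- what changed: Internal gaps come from zipping adjacent pairs instead of an index-driven while loop, the two boundary gaps are appended after them instead of before, and the result is kept ordered by stable insertion of each gap into an initially empty output instead of a final list.sort().
import Mathlib
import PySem

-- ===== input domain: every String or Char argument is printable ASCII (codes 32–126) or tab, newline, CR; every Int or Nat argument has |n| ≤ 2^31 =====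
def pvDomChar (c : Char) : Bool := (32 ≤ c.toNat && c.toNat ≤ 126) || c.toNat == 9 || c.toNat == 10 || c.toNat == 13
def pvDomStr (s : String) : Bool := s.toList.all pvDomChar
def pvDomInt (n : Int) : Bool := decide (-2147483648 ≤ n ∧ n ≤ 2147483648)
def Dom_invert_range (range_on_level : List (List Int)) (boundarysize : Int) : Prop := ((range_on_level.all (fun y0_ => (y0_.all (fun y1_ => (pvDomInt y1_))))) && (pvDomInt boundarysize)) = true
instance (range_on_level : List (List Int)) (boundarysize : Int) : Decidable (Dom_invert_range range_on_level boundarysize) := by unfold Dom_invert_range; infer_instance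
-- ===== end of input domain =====

-- B forms the internal gaps by zipping adjacent ranges, appends the boundary gaps after them,
-- and keeps the output ordered by stable insertion instead of a final sort (alternative decomposition, not claimed faster).


-- shared indexing helpers: Python's xs[i]; the .getD fallback is only reached on inputs Pre_ excludes (IndexError)
def pvGetL (xs : List (List Int)) (i : Int) : List Int := (PySem.List.pyGet? xs i).getD []
def pvGetI (xs : List Int) (i : Int) : Int := (PySem.List.pyGet? xs i).getD 0

-- ===== PORT A =====
def invert_range (range_on_level : List (List Int)) (boundarysize : Int) : List (List Int) :=
  if range_on_level = [] ∨ range_on_level = [[]] then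
    [[boundarysize, 1 - boundarysize]]
  else
    let nr0 : List (List Int) := []
    let nr1 := if pvGetI (pvGetL range_on_level 0) 0 > boundarysize then
        nr0 ++ [[boundarysize, pvGetI (pvGetL range_on_level 0) 0]] else nr0
    let nr2 := if pvGetI (pvGetL range_on_level (-1)) 1 < 1 - boundarysize then
        nr1 ++ [[pvGetI (pvGetL range_on_level (-1)) 1, 1 - boundarysize]] else nr1
    let nr3 := (PySem.List.pyRange 1 (range_on_level.length : Int)).foldl
        (fun acc i => acc ++ [[pvGetI (pvGetL range_on_level (i - 1)) 1, pvGetI (pvGetL range_on_level i) 0]]) nr2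
    PySem.List.sorted nr3 (fun x => x)

-- ===== PORT B =====
def invert_range_alt (range_on_level : List (List Int)) (boundarysize : Int) : List (List Int) :=
  if range_on_level = [] ∨ range_on_level = [[]] then
    [[boundarysize, 1 - boundarysize]]
  else
    let gaps0 := (range_on_level.zip (range_on_level.drop 1)).map
        (fun pc => [pvGetI pc.1 1, pvGetI pc.2 0])
    let gaps1 := if pvGetI (pvGetL range_on_level 0) 0 > boundarysize then
        gaps0 ++ [[boundarysize, pvGetI (pvGetL range_on_level 0) 0]] else gaps0
    let gaps2 := if pvGetI (pvGetL range_on_level (-1)) 1 < 1 - boundarysize then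
        gaps1 ++ [[pvGetI (pvGetL range_on_level (-1)) 1, 1 - boundarysize]] else gaps1
    gaps2.foldl (fun out g => PySem.List.insertBy (fun a c => decide (a < c)) g out) []

-- ===== PRECONDITION & SPEC =====
-- Pre_ excludes exactly the inputs where Python A raises IndexError: a non-trivial
-- range list containing an inner list of fewer than two elements.
def Pre_invert_range (range_on_level : List (List Int)) (boundarysize : Int) : Prop :=
  range_on_level = [] ∨ range_on_level = [[]] ∨ ∀ l ∈ range_on_level, 2 ≤ l.length
instance (range_on_level : List (List Int)) (boundarysize : Int) : Decidable (Pre_invert_range range_on_level boundarysize) := by unfold Pre_invert_range; infer_instance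
def pvWitness_invert_range : List (List Int) × Int := ([[0, 1], [2, 3]], 4)

def Spec_invert_range (range_on_level : List (List Int)) (boundarysize : Int) (out : List (List Int)) : Prop := out = invert_range_alt range_on_level boundarysize
instance (range_on_level : List (List Int)) (boundarysize : Int) (out : List (List Int)) : Decidable (Spec_invert_range range_on_level boundarysize out) := by unfold Spec_invert_range; infer_instance

-- ===== CLAIM (what is proved, stated in full; the proofs are below) =====
def Claim_equal_invert_range : Prop := ∀ (range_on_level : List (List Int)) (boundarysize : Int), Dom_invert_range range_on_level boundarysize → Pre_invert_range range_on_level boundarysize → Spec_invert_range range_on_level boundarysize (invert_range range_on_level boundarysize)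

-- ===== LEMMAS AND PROOFS =====

-- pyRange 1 (n+1) enumerated as a shifted List.range
lemma pyRange_one_eq_map (n : Nat) :
    PySem.List.pyRange 1 ((n : Int) + 1) = (List.range n).map (fun (k : Nat) => ((k : Int) + 1)) := by
  induction n with
  | zero => decide
  | succ m ih =>
      have h1 : (1 : Int) ≤ (m : Int) + 1 := by omega
      have : ((m + 1 : Nat) : Int) + 1 = ((m : Int) + 1) + 1 := by push_cast; ring
      rw [this, PySem.List.pyRange_one_succ_right h1, ih, List.range_succ]
      simp

-- the zip comprehension of B equals A's indexed internal-gap sequence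
lemma gap_zip (r : List (List Int)) :
    (r.zip (r.drop 1)).map (fun pc => [pvGetI pc.1 1, pvGetI pc.2 0])
      = (PySem.List.pyRange 1 (r.length : Int)).map
          (fun i => [pvGetI (pvGetL r (i - 1)) 1, pvGetI (pvGetL r i) 0]) := by
  cases r with
  | nil => decide
  | cons x t =>
      have hlen : ((x :: t).length : Int) = (t.length : Int) + 1 := by
        simp [List.length_cons]
      rw [hlen, pyRange_one_eq_map]
      apply List.ext_getElem
      · simp [List.length_zip]
      · intro k h1 h2
        simp only [List.getElem_map, List.getElem_zip, List.getElem_range]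
        have hk : k < t.length := by simpa using h2
        have e1 : (k : Int) + 1 - 1 = ((k : Nat) : Int) := by ring
        have e2 : ((k : Nat) : Int) + 1 = (((k + 1 : Nat)) : Int) := by push_cast; ring
        rw [e1, e2]
        unfold pvGetL
        rw [PySem.List.pyGet?_natCast, PySem.List.pyGet?_natCast]
        have hg1 : (x :: t)[(k : Nat)]? = some ((x :: t)[k]'(by simpa using Nat.lt_succ_of_lt hk)) :=
          List.getElem?_eq_getElem _
        have hg2 : (x :: t)[(k + 1 : Nat)]? = some ((x :: t)[k + 1]'(by simpa using Nat.succ_lt_succ hk)) :=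
          List.getElem?_eq_getElem _
        rw [hg1, hg2]
        simp

-- 'if c then x ++ [a] else x' as appending an if-singleton
lemma app_if {α : Type} (c : Prop) [Decidable c] (x : List α) (a : α) :
    (if c then x ++ [a] else x) = x ++ (if c then [a] else []) := by
  split_ifs <;> simp

-- the two DecidableLT instances on List Int agree (Decidable is a subsingleton)
lemma decLT_bridge : (fun (a b : List Int) => a.decidableLT b) = (LinearOrder.toDecidableLT (α := List Int)) := by
  funext a b; exact Subsingleton.elim _ _

lemma perm3 {α : Type} (L R G : List α) : ((L ++ R) ++ G).Perm ((G ++ L) ++ R) := by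
  simpa [List.append_assoc] using List.perm_append_comm (l₁ := L ++ R) (l₂ := G)

-- ===== VERDICT (by name: the statement is the Claim_ definition above) =====
theorem invert_range_spec : Claim_equal_invert_range := by
  intro r b _hd _hp
  unfold Spec_invert_range invert_range invert_range_alt
  by_cases h : r = [] ∨ r = [[]]
  · simp [h]
  · rw [if_neg h, if_neg h]
    dsimp only
    rw [← PySem.List.sorted_eq_foldl_insertBy _ (fun x => x)]
    rw [PySem.List.foldl_append_singleton_eq_map]
    rw [gap_zip]
    simp only [List.nil_append, app_if]
    rw [decLT_bridge]
    exact PySem.List.sorted_eq_sorted_of_perm _ _ (fun x : List Int => x) (fun a c hac => hac) (perm3 _ _ _)
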